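-- pv_equiv track=rewrite | github.com/AmberLee2427/nancy-brain | nancy_brain/chunking.py | strip_chunk_suffix
-- ===== SOURCE A (Python) =====
-- _CHUNK_MARKERS = ("#chunk-", "::chunk-", "|chunk:", "@chunk:")
--
-- def strip_chunk_suffix(doc_id: str) -> str:
--     """Strip any chunk suffix that may have been appended to an identifier."""
--     if not doc_id:
--         return doc_id
--     base = doc_id
--     for marker in _CHUNK_MARKERS:
--         idx = base.find(marker)
--         if idx != -1:
--             base = base[:idx]
--     return base
-- ===== SOURCE B (Python) =====
-- _CHUNK_MARKERS = ("#chunk-", "::chunk-", "|chunk:", "@chunk:")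
--
-- def strip_chunk_suffix(doc_id: str) -> str:
--     """Strip any chunk suffix that may have been appended to an identifier."""
--     positions = [i for i in (doc_id.find(m) for m in _CHUNK_MARKERS) if i != -1]
--     return doc_id[:min(positions)] if positions else doc_id
-- ===== Notes on version B (the rewrite author's own statement) =====
-- stated objective: simpler
-- what changed: B replaces A's truncate-and-rescan loop (which re-searches a shrinking copy of the string for each marker) by collecting each marker's first-occurrence index in the original string and slicing once at the minimum; Pre_ excludes doc_ids containing an overlapping pair of marker occurrences ('|chunk::chunk-' or '@chunk::chunk-'), a malformed corner where A's sequential rescan and B's earliest-marker cut are both defensible.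
-- outside the precondition, e.g. on strip_chunk_suffix('|chunk::chunk-'): A returns '|chunk', B returns ''; on strip_chunk_suffix('@chunk::chunk-'): A returns '@chunk', B returns ''
import Mathlib
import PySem

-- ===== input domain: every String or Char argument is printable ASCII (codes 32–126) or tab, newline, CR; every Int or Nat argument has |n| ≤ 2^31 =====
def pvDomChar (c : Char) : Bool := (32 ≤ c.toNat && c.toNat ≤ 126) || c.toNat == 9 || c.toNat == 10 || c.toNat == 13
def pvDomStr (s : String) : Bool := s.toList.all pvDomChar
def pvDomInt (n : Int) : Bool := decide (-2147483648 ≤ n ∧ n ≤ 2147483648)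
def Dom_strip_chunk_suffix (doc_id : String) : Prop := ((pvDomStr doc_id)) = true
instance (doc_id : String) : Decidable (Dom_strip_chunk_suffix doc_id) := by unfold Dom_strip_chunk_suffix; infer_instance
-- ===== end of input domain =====

-- B collects every marker's first-occurrence index in the original string and slices
-- once at the minimum, instead of A's truncate-and-rescan loop; return value only.

-- the module constant _CHUNK_MARKERS
def pvMarkers : List String := ["#chunk-", "::chunk-", "|chunk:", "@chunk:"]

-- ===== PORT A =====
def strip_chunk_suffix (doc_id : String) : String :=
  if doc_id = "" then doc_id
  else
    pvMarkers.foldl (fun base marker =>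
        let idx := PySem.Str.find base marker
        if idx ≠ -1 then PySem.Str.slice base none (some idx) else base)
      doc_id

-- ===== PORT B =====
def strip_chunk_suffix_alt (doc_id : String) : String :=
  let positions := (pvMarkers.map (fun m => PySem.Str.find doc_id m)).filter (fun i => i != -1)
  match PySem.List.min? positions (fun i => i) with
  | some v => PySem.Str.slice doc_id none (some v)
  | none => doc_id

-- ===== PRECONDITION & SPEC =====
-- Pre_ excludes doc_ids containing two overlapping marker occurrences (the substrings
-- "|chunk::chunk-" or "@chunk::chunk-"): there A's sequential truncate-and-rescan keeps
-- the straddled text while B cuts at the earliest marker, and either value is defensible.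
def Pre_strip_chunk_suffix (doc_id : String) : Prop :=
  PySem.Str.isIn "|chunk::chunk-" doc_id = false ∧ PySem.Str.isIn "@chunk::chunk-" doc_id = false
instance (doc_id : String) : Decidable (Pre_strip_chunk_suffix doc_id) := by unfold Pre_strip_chunk_suffix; infer_instance
def pvWitness_strip_chunk_suffix : String := "papers/doc#chunk-003"
def Spec_strip_chunk_suffix (doc_id : String) (out : String) : Prop := out = strip_chunk_suffix_alt doc_id
instance (doc_id : String) (out : String) : Decidable (Spec_strip_chunk_suffix doc_id out) := by unfold Spec_strip_chunk_suffix; infer_instance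

-- ===== CLAIM (what is proved, stated in full; the proofs are below) =====
def Claim_equal_strip_chunk_suffix : Prop := ∀ (doc_id : String), Dom_strip_chunk_suffix doc_id → Pre_strip_chunk_suffix doc_id → Spec_strip_chunk_suffix doc_id (strip_chunk_suffix doc_id)

-- ===== LEMMAS AND PROOFS =====

theorem find_spec0 (l sub : List Char) (h : PySem.Chars.find l sub ≠ -1) :
    0 ≤ PySem.Chars.find l sub ∧ sub <+: l.drop (PySem.Chars.find l sub).toNat ∧
    ∀ i : ℕ, i < (PySem.Chars.find l sub).toNat → ¬ sub <+: l.drop i := by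
  have h' : PySem.Chars.findFrom l sub ((0:ℕ) : ℤ) ≠ -1 := by simpa using h
  have := PySem.Chars.findFrom_natCast_spec l sub 0 (Nat.zero_le _) h'
  simp only [Nat.cast_zero, PySem.Chars.findFrom_zero] at this
  exact ⟨this.1, this.2.1, fun i hi => this.2.2 i (Nat.zero_le _) hi⟩

theorem find_eq_of (l sub : List Char) (f : ℕ)
    (occ : sub <+: l.drop f) (hmin : ∀ i : ℕ, i < f → ¬ sub <+: l.drop i) :
    PySem.Chars.find l sub = (f : ℤ) := by
  have hne : PySem.Chars.find l sub ≠ -1 := by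
    intro hneg
    exact ((PySem.Chars.find_eq_neg_one_iff l sub).mp hneg)
      (occ.isInfix.trans (List.drop_suffix f l).isInfix)
  obtain ⟨hpos, occ', hmin'⟩ := find_spec0 l sub hne
  have : (PySem.Chars.find l sub).toNat = f := by
    rcases lt_trichotomy (PySem.Chars.find l sub).toNat f with h | h | h
    · exact absurd occ' (hmin _ h)
    · exact h
    · exact absurd occ (hmin' f h)
  omega

theorem prefix_drop_take (l sub : List Char) (c i : ℕ) (hic : i ≤ c) :
    sub <+: (l.take c).drop i ↔ (sub <+: l.drop i ∧ i + sub.length ≤ c) := by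
  rw [List.drop_take, List.prefix_take_iff]
  constructor
  · rintro ⟨h1, h2⟩; exact ⟨h1, by omega⟩
  · rintro ⟨h1, h2⟩; exact ⟨h1, by omega⟩

theorem find_take (l sub : List Char) (c : Nat) :
    PySem.Chars.find (l.take c) sub =
      if PySem.Chars.find l sub ≠ -1 ∧ PySem.Chars.find l sub + sub.length ≤ (c : Int)
      then PySem.Chars.find l sub else -1 := by
  by_cases hsub : sub = []
  · subst hsub
    simp
  · by_cases hne : PySem.Chars.find l sub ≠ -1 ∧
        PySem.Chars.find l sub + sub.length ≤ (c : Int)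
    · obtain ⟨h1, h2⟩ := hne
      obtain ⟨hpos, occ, hmin⟩ := find_spec0 l sub h1
      rw [if_pos ⟨h1, h2⟩]
      have hfc : (PySem.Chars.find l sub).toNat + sub.length ≤ c := by omega
      have occ' : sub <+: (l.take c).drop (PySem.Chars.find l sub).toNat :=
        (prefix_drop_take l sub c _ (by omega)).mpr ⟨occ, hfc⟩
      have := find_eq_of (l.take c) sub (PySem.Chars.find l sub).toNat occ'
        (fun i hi hpre => hmin i hi
          ((prefix_drop_take l sub c i (by omega)).mp hpre).1)
      omega
    · rw [if_neg hne]
      by_contra hfind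
      obtain ⟨hpos, occ, hmin⟩ := find_spec0 (l.take c) sub hfind
      set g := (PySem.Chars.find (l.take c) sub).toNat with hg
      have hgc : g ≤ c := by
        by_contra hgc
        have : (l.take c).drop g = [] := by
          apply List.drop_eq_nil_of_le
          simp; omega
        rw [this] at occ
        exact hsub (List.prefix_nil.mp occ)
      obtain ⟨occ2, hfit⟩ := (prefix_drop_take l sub c g hgc).mp occ
      have hlne : PySem.Chars.find l sub ≠ -1 := by
        intro hneg
        exact ((PySem.Chars.find_eq_neg_one_iff l sub).mp hneg)
          (occ2.isInfix.trans (List.drop_suffix g l).isInfix)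
      obtain ⟨hp2, occf, hminf⟩ := find_spec0 l sub hlne
      have hge : (PySem.Chars.find l sub).toNat ≤ g := by
        by_contra h
        exact hminf g (by omega) occ2
      have : PySem.Chars.find l sub + sub.length ≤ (c : Int) := by omega
      exact hne ⟨hlne, this⟩

-- the loop invariant: A's shrinking base is always `take cut` of the original
theorem fold_inv (ms : List (List Char)) (l : List Char) :
    ∀ (c : Int), 0 ≤ c → c ≤ l.length →
    (ms.foldl (fun base m =>
        let idx := PySem.Chars.find base m
        if idx ≠ -1 then PySem.Chars.slice base none (some idx) else base)
      (l.take c.toNat)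
      = l.take ((ms.foldl (fun cut m =>
          if PySem.Chars.find l m ≠ -1 ∧ PySem.Chars.find l m + m.length ≤ cut
          then PySem.Chars.find l m else cut) c).toNat)
    ∧ 0 ≤ (ms.foldl (fun cut m =>
          if PySem.Chars.find l m ≠ -1 ∧ PySem.Chars.find l m + m.length ≤ cut
          then PySem.Chars.find l m else cut) c)
    ∧ (ms.foldl (fun cut m =>
          if PySem.Chars.find l m ≠ -1 ∧ PySem.Chars.find l m + m.length ≤ cut
          then PySem.Chars.find l m else cut) c) ≤ l.length) := by
  induction ms with
  | nil =>
    intro c h0 hc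
    exact ⟨rfl, h0, hc⟩
  | cons m ms ih =>
    intro c h0 hc
    simp only [List.foldl_cons]
    have hft := find_take l m c.toNat
    rw [Int.toNat_of_nonneg h0] at hft
    by_cases hcond : PySem.Chars.find l m ≠ -1 ∧ PySem.Chars.find l m + m.length ≤ c
    · rw [if_pos hcond] at hft
      have hpos : 0 ≤ PySem.Chars.find l m := (find_spec0 l m hcond.1).1
      have hstep : (let idx := PySem.Chars.find (l.take c.toNat) m;
          if idx ≠ -1 then PySem.Chars.slice (l.take c.toNat) none (some idx)
          else (l.take c.toNat)) = l.take (PySem.Chars.find l m).toNat := by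
        simp only [hft, if_pos hcond.1]
        rw [PySem.Chars.slice_eq_listSlice, PySem.List.slice_to _ hpos,
          List.take_take]
        congr 1
        omega
      rw [hstep, if_pos hcond]
      exact ih (PySem.Chars.find l m) hpos (by omega)
    · rw [if_neg hcond] at hft
      have hstep : (let idx := PySem.Chars.find (l.take c.toNat) m;
          if idx ≠ -1 then PySem.Chars.slice (l.take c.toNat) none (some idx)
          else (l.take c.toNat)) = l.take c.toNat := by
        simp [hft]
      rw [hstep, if_neg hcond]
      exact ih c h0 hc

-- string-level fold of A reduces to the char-level fold
theorem foldA_toList (ms : List String) (s : String) :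
    (ms.foldl (fun base marker =>
        let idx := PySem.Str.find base marker
        if idx ≠ -1 then PySem.Str.slice base none (some idx) else base) s).toList
    = (ms.map String.toList).foldl (fun base m =>
        let idx := PySem.Chars.find base m
        if idx ≠ -1 then PySem.Chars.slice base none (some idx) else base) s.toList := by
  induction ms generalizing s with
  | nil => simp
  | cons m ms ih =>
    simp only [List.foldl_cons, List.map_cons]
    rw [ih]
    congr 1
    simp only [PySem.Str.find_eq]
    split
    · rw [PySem.Str.toList_slice]
    · rfl

-- a concrete check over the four markers: any consistent proper overlap of two marker
-- occurrences merges into one of the two excluded patterns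
theorem overlap_cases :
    ∀ m ∈ pvMarkers.map String.toList, ∀ m' ∈ pvMarkers.map String.toList,
      ∀ k ∈ List.range 8, 0 < k → k < m.length →
      (m.drop k <+: m' ∨ m' <+: m.drop k) →
      (m.take k ++ m' = "|chunk::chunk-".toList ∨ m.take k ++ m' = "@chunk::chunk-".toList) := by
  decide

-- under Pre_, a marker occurrence strictly before a reachable cut fits entirely below it
theorem no_straddle (l : List Char)
    (hp1 : ¬ "|chunk::chunk-".toList <:+: l) (hp2 : ¬ "@chunk::chunk-".toList <:+: l)
    (m : List Char) (hm : m ∈ pvMarkers.map String.toList) (cut : Int)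
    (hcut : cut = (l.length : Int) ∨ ∃ mm ∈ pvMarkers.map String.toList,
        PySem.Chars.find l mm ≠ -1 ∧ PySem.Chars.find l mm = cut)
    (hf : PySem.Chars.find l m ≠ -1) (hlt : PySem.Chars.find l m < cut) :
    PySem.Chars.find l m + m.length ≤ cut := by
  obtain ⟨hpos, occ, -⟩ := find_spec0 l m hf
  have hml : 0 < m.length ∧ m.length ≤ 8 := by
    fin_cases hm <;> exact ⟨by decide, by decide⟩
  have hfit : (PySem.Chars.find l m).toNat + m.length ≤ l.length := by
    have := occ.length_le
    simp at this
    omega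
  rcases hcut with rfl | ⟨mm, hmm, hfmm, rfl⟩
  · omega
  · by_contra hgt
    obtain ⟨hpos', occ', -⟩ := find_spec0 l mm hfmm
    set p := (PySem.Chars.find l m).toNat with hp
    set c := (PySem.Chars.find l mm).toNat with hc
    have hpc : p < c := by omega
    have hck : c < p + m.length := by omega
    set k := c - p with hk
    have hk0 : 0 < k := by omega
    have hkm : k < m.length := by omega
    -- the two occurrences overlap: m.drop k and mm are both prefixes of l.drop c
    have hdk : (l.drop p).drop k = l.drop c := by
      rw [List.drop_drop]; congr 1; omega
    have hmk : m.drop k <+: l.drop c := by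
      rw [← hdk]; exact occ.drop k
    have hover : m.drop k <+: mm ∨ mm <+: m.drop k :=
      List.prefix_or_prefix_of_prefix hmk occ'
    have hkr : k ∈ List.range 8 := by
      simp only [List.mem_range]; omega
    have hpat := overlap_cases m hm mm hmm k hkr hk0 hkm hover
    -- the merged pattern occurs in l at p
    have htk : (l.drop p).take k = m.take k := by
      obtain ⟨r, hr⟩ := occ
      rw [← hr, List.take_append_of_le_length (le_of_lt hkm)]
    have hocc : m.take k ++ mm <+: l.drop p := by
      obtain ⟨r, hr⟩ := occ'
      refine ⟨r, ?_⟩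
      rw [List.append_assoc, hr, ← hdk, ← htk, List.take_append_drop]
    have hinf : m.take k ++ mm <:+: l :=
      hocc.isInfix.trans (List.drop_suffix p l).isInfix
    rcases hpat with h | h
    · exact hp1 (h ▸ hinf)
    · exact hp2 (h ▸ hinf)

-- under Pre_, A's width-tested fold is the plain running-minimum fold
theorem foldW_eq_foldMin (l : List Char)
    (hp1 : ¬ "|chunk::chunk-".toList <:+: l) (hp2 : ¬ "@chunk::chunk-".toList <:+: l) :
    ∀ (ms : List (List Char)), (∀ m ∈ ms, m ∈ pvMarkers.map String.toList) →
    ∀ (c : Int), (c = (l.length : Int) ∨ ∃ mm ∈ pvMarkers.map String.toList,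
        PySem.Chars.find l mm ≠ -1 ∧ PySem.Chars.find l mm = c) →
    ms.foldl (fun cut m =>
        if PySem.Chars.find l m ≠ -1 ∧ PySem.Chars.find l m + m.length ≤ cut
        then PySem.Chars.find l m else cut) c
    = ms.foldl (fun cut m =>
        if PySem.Chars.find l m ≠ -1 then min (PySem.Chars.find l m) cut else cut) c := by
  intro ms
  induction ms with
  | nil => intro _ c _; rfl
  | cons m ms ih =>
    intro hsub c hc
    simp only [List.foldl_cons]
    have hm := hsub m List.mem_cons_self
    by_cases hf : PySem.Chars.find l m ≠ -1
    · by_cases hlt : PySem.Chars.find l m < c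
      · have hfits := no_straddle l hp1 hp2 m hm c hc hf hlt
        rw [if_pos ⟨hf, hfits⟩, if_pos hf, min_eq_left (le_of_lt hlt)]
        exact ih (fun x hx => hsub x (List.mem_cons_of_mem m hx)) _
          (Or.inr ⟨m, hm, hf, rfl⟩)
      · have hge : c ≤ PySem.Chars.find l m := by omega
        have hnot : ¬ (PySem.Chars.find l m ≠ -1 ∧ PySem.Chars.find l m + m.length ≤ c) := by
          intro ⟨_, hle⟩
          have hml : 0 < m.length := by fin_cases hm <;> decide
          omega
        rw [if_neg hnot, if_pos hf, min_eq_right hge]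
        exact ih (fun x hx => hsub x (List.mem_cons_of_mem m hx)) c hc
    · have hnot : ¬ (PySem.Chars.find l m ≠ -1 ∧ PySem.Chars.find l m + m.length ≤ c) :=
        fun hc => hf hc.1
      rw [if_neg hnot, if_neg hf]
      exact ih (fun x hx => hsub x (List.mem_cons_of_mem m hx)) c hc

-- the running-minimum fold over positions equals foldl min over the filtered positions
theorem foldMin_filter (ps : List Int) :
    ∀ c : Int, ps.foldl (fun cut p => if p ≠ -1 then min p cut else cut) c
      = (ps.filter (fun i => i != -1)).foldl min c := by
  induction ps with
  | nil => intro c; rfl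
  | cons p ps ih =>
    intro c
    simp only [List.foldl_cons, List.filter_cons]
    by_cases h : p = -1
    · have hb : ¬ ((p != -1) = true) := by simp [h]
      rw [if_neg (by simpa using h : ¬ p ≠ -1), if_neg hb]
      exact ih c
    · have hb : (p != -1) = true := by simp [h]
      rw [if_pos h, if_pos hb, List.foldl_cons, min_comm p c]
      exact ih (min c p)

theorem foldl_min_nonneg (t : List Int) :
    ∀ x : Int, 0 ≤ x → (∀ y ∈ t, 0 ≤ y) → 0 ≤ t.foldl min x := by
  induction t with
  | nil => intro x hx _; simpa using hx
  | cons y t ih =>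
    intro x hx hall
    simp only [List.foldl_cons]
    exact ih _ (le_min hx (hall y List.mem_cons_self))
      (fun z hz => hall z (List.mem_cons_of_mem y hz))

-- ===== VERDICT (by name: the statement is the Claim_ definition above) =====
theorem strip_chunk_suffix_spec : Claim_equal_strip_chunk_suffix := by
  intro doc_id _ hpre
  obtain ⟨hpre1, hpre2⟩ := hpre
  have hp1 : ¬ "|chunk::chunk-".toList <:+: doc_id.toList := by
    intro h
    rw [← PySem.Str.isIn_iff_infix, hpre1] at h
    exact absurd h (by decide)
  have hp2 : ¬ "@chunk::chunk-".toList <:+: doc_id.toList := by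
    intro h
    rw [← PySem.Str.isIn_iff_infix, hpre2] at h
    exact absurd h (by decide)
  unfold Spec_strip_chunk_suffix strip_chunk_suffix strip_chunk_suffix_alt
  by_cases hempty : doc_id = ""
  · subst hempty; decide
  · rw [if_neg hempty, ← String.toList_inj, foldA_toList]
    set l := doc_id.toList with hl
    have hinv := fold_inv (pvMarkers.map String.toList) l
      (l.length) (by positivity) (by simp)
    obtain ⟨hA, -, -⟩ := hinv
    rw [Int.toNat_natCast, List.take_length] at hA
    -- bridge to B's positions list
    have hmap : (pvMarkers.map String.toList).foldl (fun cut m =>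
          if PySem.Chars.find l m ≠ -1 then min (PySem.Chars.find l m) cut else cut)
          ((l.length : Int))
        = ((pvMarkers.map (fun m => PySem.Str.find doc_id m)).foldl
            (fun cut p => if p ≠ -1 then min p cut else cut) ((l.length : Int))) := by
      simp only [List.foldl_map, PySem.Str.find_eq]
      rw [← hl]
    rw [hA, foldW_eq_foldMin l hp1 hp2 _ (fun m hm => hm) _ (Or.inl rfl), hmap,
      foldMin_filter]
    set ps := (pvMarkers.map (fun m => PySem.Str.find doc_id m)).filter (fun i => i != -1)
      with hps
    have hbound : ∀ p ∈ ps, 0 ≤ p ∧ p ≤ (l.length : Int) := by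
      intro p hp
      rw [hps, List.mem_filter] at hp
      obtain ⟨hp1', hp2'⟩ := hp
      obtain ⟨m, hm, rfl⟩ := List.mem_map.mp hp1'
      have hne : PySem.Chars.find l m.toList ≠ -1 := by
        simpa using (by simpa using hp2' : PySem.Str.find doc_id m ≠ -1)
      have hml : 0 < m.toList.length := by fin_cases hm <;> decide
      obtain ⟨hpos, occ, -⟩ := find_spec0 l m.toList hne
      have hdl := occ.length_le
      rw [List.length_drop] at hdl
      simp only [PySem.Str.find_eq]
      rw [← hl]
      constructor
      · exact hpos
      · omega
    cases hcase : ps with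
    | nil =>
      simp [Int.toNat_natCast, PySem.List.min?]
      exact hl
    | cons x t =>
      have hx := hbound x (by rw [hcase]; exact List.mem_cons_self)
      have hv0 : 0 ≤ t.foldl min x := foldl_min_nonneg t x hx.1
        (fun y hy => (hbound y (by rw [hcase]; exact List.mem_cons_of_mem x hy)).1)
      simp only [PySem.List.min?_id_cons, List.foldl_cons, PySem.Str.toList_slice,
        PySem.Chars.slice_eq_listSlice]
      rw [min_eq_right hx.2, PySem.List.slice_to _ hv0]
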